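-- pv_equiv track=rewrite | github.com/PrinceSinghhub/GFG-Questions | Maximize sum(arr[i]mul i) of an Array.py | Maximize
-- ===== SOURCE A (Python) =====
-- def Maximize(a, n):
--     mod = (10 ** 9 )+ 7
--     a.sort()
--     ans = 0
--     for i in range(n):
--         pro = a[i] * i
--         ans += pro
--
--     return ans % mod
-- ===== SOURCE B (Python) =====
-- def Maximize(a, n):
--     # sort in place (same mutation as A), then one backward pass over the first
--     # max(n, 0) elements accumulating suffix sums: no indexing, no multiplication.
--     a.sort()
--     s = 0
--     ans = 0
--     for x in reversed(a[:max(n, 0)]):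
--         ans += s
--         s += x
--     return ans % ((10 ** 9) + 7)
-- ===== Notes on version B (the rewrite author's own statement) =====
-- stated objective: alternative
-- what changed: Replaces the forward indexed i*a[i] loop by a reversed pass over the sorted first-n prefix that accumulates suffix sums (no indexing, no multiplication); the in-place sort and its mutation side-effect are preserved.
import Mathlib
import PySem

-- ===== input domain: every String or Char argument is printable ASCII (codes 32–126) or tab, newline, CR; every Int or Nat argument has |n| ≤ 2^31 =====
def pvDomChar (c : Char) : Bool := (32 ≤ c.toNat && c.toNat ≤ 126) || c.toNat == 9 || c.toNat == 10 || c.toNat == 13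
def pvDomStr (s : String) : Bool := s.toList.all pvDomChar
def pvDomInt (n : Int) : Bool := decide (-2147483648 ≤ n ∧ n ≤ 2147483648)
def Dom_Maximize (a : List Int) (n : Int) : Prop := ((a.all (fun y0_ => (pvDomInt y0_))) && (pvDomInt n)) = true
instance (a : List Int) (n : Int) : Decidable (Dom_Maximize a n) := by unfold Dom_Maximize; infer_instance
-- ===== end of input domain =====

-- B replaces A's forward indexed i*a[i] loop by a reversed pass over the sorted first-n prefix
-- accumulating suffix sums (no indexing, no multiplication); the in-place sort mutation is the
-- same in both, and the equivalence proved here is about the return value.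


-- ===== PORT A =====
-- a.sort(); ans = sum over i in range(n) of a[i]*i; return ans % (10^9+7)
-- a[i] is ported as pyGetD (total form); Pre_ keeps exactly the in-range indices.
def Maximize (a : List Int) (n : Int) : Int :=
  let s := PySem.List.sorted a (fun x => x) false
  let ans := (PySem.List.pyRange 0 n 1).foldl
    (fun ans i => ans + PySem.List.pyGetD s i 0 * i) 0
  PySem.Int.mod ans ((10 ^ 9) + 7)

-- ===== PORT B =====
-- a.sort(); then for x in reversed(a[:max(n,0)]): ans += s; s += x; return ans % (10^9+7)
def Maximize_alt (a : List Int) (n : Int) : Int :=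
  let srt := PySem.List.sorted a (fun x => x) false
  let p := (PySem.List.slice srt none (some (max n 0))).reverse.foldl
    (fun (st : Int × Int) x => (st.1 + x, st.2 + st.1)) (0, 0)
  PySem.Int.mod p.2 ((10 ^ 9) + 7)

-- ===== PRECONDITION & SPEC =====
-- Pre_ excludes exactly n > len(a), where Python A raises IndexError at a[i].
def Pre_Maximize (a : List Int) (n : Int) : Prop := n ≤ (a.length : Int)
instance (a : List Int) (n : Int) : Decidable (Pre_Maximize a n) := by unfold Pre_Maximize; infer_instance
def pvWitness_Maximize : List Int × Int := ([3, 1, 2], 3)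
def Spec_Maximize (a : List Int) (n : Int) (out : Int) : Prop := out = Maximize_alt a n
instance (a : List Int) (n : Int) (out : Int) : Decidable (Spec_Maximize a n out) := by unfold Spec_Maximize; infer_instance

-- ===== CLAIM (what is proved, stated in full; the proofs are below) =====
def Claim_equal_Maximize : Prop := ∀ (a : List Int) (n : Int), Dom_Maximize a n → Pre_Maximize a n → Spec_Maximize a n (Maximize a n)

-- ===== LEMMAS AND PROOFS =====

-- Σ_{i<m} g i * i  (A's accumulated sum, by index)
def asum (g : Int → Int) : Nat → Int
  | 0 => 0
  | m + 1 => asum g m + g m * m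

-- Σ_i i * l[i]  over a list, structurally
def wlist : List Int → Int
  | [] => 0
  | _ :: rest => wlist rest + rest.sum

theorem wlist_append_single (l : List Int) (y : Int) :
    wlist (l ++ [y]) = wlist l + (l.length : Int) * y := by
  induction l with
  | nil => simp [wlist]
  | cons x l ih =>
      simp only [List.cons_append, wlist, ih, List.sum_append, List.length_cons, List.sum_cons,
        List.sum_nil]
      push_cast; ring

theorem foldl_A (g : Int → Int) : ∀ (m : Nat) (c : Int),
    (PySem.List.pyRange 0 (m : Int) 1).foldl (fun ans i => ans + g i * i) c = c + asum g m := by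
  intro m
  induction m with
  | zero => intro c; simp [PySem.List.pyRange_one_eq_nil, asum]
  | succ k ih =>
      intro c
      have h : PySem.List.pyRange 0 ((k : Int) + 1) 1
          = PySem.List.pyRange 0 (k : Int) 1 ++ [(k : Int)] :=
        PySem.List.pyRange_one_succ_right (by positivity)
      rw [show ((k + 1 : Nat) : Int) = (k : Int) + 1 by push_cast; ring, h,
        List.foldl_append, ih]
      simp [asum]; ring

theorem asum_eq_wlist_take (s : List Int) : ∀ m : Nat, m ≤ s.length →
    asum (fun i => PySem.List.pyGetD s i 0) m = wlist (s.take m) := by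
  intro m
  induction m with
  | zero => intro _; simp [asum, wlist]
  | succ k ih =>
      intro hm
      have hk : k < s.length := by omega
      have htake : s.take (k + 1) = s.take k ++ [s[k]] := by
        rw [List.take_add_one]
        simp [List.getElem?_eq_getElem hk]
      rw [htake, wlist_append_single, ← ih (by omega)]
      simp only [asum]
      rw [PySem.List.pyGetD_natCast, List.getD_eq_getElem?_getD,
        List.getElem?_eq_getElem hk]
      simp [List.length_take, Nat.min_eq_left (Nat.le_of_lt hk)]
      ring

-- B's reversed fold over a list l lands on (s0 + Σ l, a0 + |l|·s0 + wlist l)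
theorem foldl_B (l : List Int) : ∀ (s0 a0 : Int),
    l.reverse.foldl (fun (st : Int × Int) x => (st.1 + x, st.2 + st.1)) (s0, a0)
    = (s0 + l.sum, a0 + (l.length : Int) * s0 + wlist l) := by
  induction l with
  | nil => intro s0 a0; simp [wlist]
  | cons x l ih =>
      intro s0 a0
      rw [List.reverse_cons, List.foldl_append]
      simp only [List.foldl_cons, List.foldl_nil, ih]
      simp only [wlist, List.sum_cons, List.length_cons, Prod.mk.injEq]
      constructor <;> (push_cast; ring)

-- ===== VERDICT (by name: the statement is the Claim_ definition above) =====
theorem Maximize_spec : Claim_equal_Maximize := by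
  intro a n _ hpre
  unfold Spec_Maximize Maximize Maximize_alt
  set s := PySem.List.sorted a (fun x => x) false with hs
  have hlen : s.length = a.length := PySem.List.length_sorted ..
  by_cases hn0 : n < 0
  · simp only []
    rw [PySem.List.pyRange_one_eq_nil (by omega),
      show max n 0 = ((0 : Nat) : Int) by omega, PySem.List.slice_to_natCast]
    simp
  · obtain ⟨m, rfl⟩ : ∃ m : Nat, n = (m : Int) := ⟨n.toNat, by omega⟩
    have hm : m ≤ s.length := by unfold Pre_Maximize at hpre; omega
    simp only []
    rw [show max ((m : Nat) : Int) 0 = ((m : Nat) : Int) by omega,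
      PySem.List.slice_to_natCast, foldl_A _ m 0, foldl_B]
    simp [asum_eq_wlist_take s m hm]
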